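-- pv_equiv track=rewrite | github.com/jahirulislammolla/CodeFights | Fights/digitDifferenceSort.py | digitDifferenceSort
-- ===== SOURCE A (Python) =====
-- def digitDifferenceSort(a):
--     x={}
--     y=[]
--     for i in a:
--         m=sorted(str(i))
--         d=abs(int(m[0])-int(m[-1]))
--         if d not in x:
--             x[d]=[]
--         x[d]+=[i]
--     for i in sorted(x):
--         y+=x[i][::-1]
--     return y
-- ===== SOURCE B (Python) =====
-- def digitDifferenceSort(a):
--     # Stable insertion into a (key, value) list kept ascending by key; each new
--     # element is inserted BEFORE the first entry whose key is >= its own key,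
--     # so equal-key elements end up in reversed input order. No dict, no sort call.
--     out = []
--     for i in a:
--         m = sorted(str(i))
--         d = abs(int(m[0]) - int(m[-1]))
--         j = 0
--         while j < len(out) and out[j][0] < d:
--             j += 1
--         out.insert(j, (d, i))
--     return [v for _, v in out]
-- ===== Notes on version B (the rewrite author's own statement) =====
-- stated objective: alternative
-- what changed: Replaces A's grouping dict + sort of the keys + per-group slice reversal with a single stable insertion sort into a (key,value) list: each element is inserted before the first entry whose key is >= its own, so keys come out ascending and equal-key elements in reversed input order, exactly A's per-group reversal.
import Mathlib
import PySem

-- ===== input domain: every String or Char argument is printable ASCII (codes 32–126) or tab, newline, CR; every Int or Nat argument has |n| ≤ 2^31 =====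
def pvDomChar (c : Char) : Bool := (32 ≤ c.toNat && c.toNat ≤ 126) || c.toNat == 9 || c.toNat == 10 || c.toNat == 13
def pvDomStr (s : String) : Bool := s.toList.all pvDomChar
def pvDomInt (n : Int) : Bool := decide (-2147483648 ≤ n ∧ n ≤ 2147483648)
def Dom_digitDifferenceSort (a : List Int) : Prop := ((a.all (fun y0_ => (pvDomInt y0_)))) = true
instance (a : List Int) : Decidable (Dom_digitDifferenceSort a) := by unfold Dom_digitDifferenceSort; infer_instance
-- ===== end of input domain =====

-- B replaces A's grouping dict + key sort + per-group slice reversal with one stable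
-- insertion sort into a (key,value) list (insert before the first entry with key >= own):
-- an alternative algorithm of the same output, no dict and no sort call.


-- ===== PORT A =====
-- the digit-difference key: abs of int(first char) minus int(last char) of the sorted
-- string of i; the .getD defaults are unreachable under Pre_ (str(i) is nonempty then).
def pvKey (i : Int) : Int :=
  let m := PySem.List.sorted (PySem.Int.toStr i).toList (fun c => c) false
  let lo := (PySem.Int.ofStr? (String.ofList [(PySem.List.pyGet? m 0).getD ' '])).getD 0
  let hi := (PySem.Int.ofStr? (String.ofList [(PySem.List.pyGet? m (-1)).getD ' '])).getD 0
  |lo - hi|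

def digitDifferenceSort (a : List Int) : List Int :=
  let x := a.foldl (fun (x : PySem.Dict Int (List Int)) i =>
      let d := pvKey i
      let x := if x.contains d then x else x.insert d []   -- if d not in x: x[d]=[]
      x.insert d (x.getD d [] ++ [i])) PySem.Dict.empty     -- x[d] += [i]
  (PySem.List.sorted x.keys (fun j => j) false).foldl
    (fun y i => y ++ (PySem.List.slice? (x.getD i []) none none (-1)).getD []) []   -- y += x[i][::-1]

-- ===== PORT B =====
-- the while/insert loop of Source B: walk past entries with key < d, put (d, i) there
def pvIns (d i : Int) : List (Int × Int) → List (Int × Int)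
  | [] => [(d, i)]
  | p :: t => if p.1 < d then p :: pvIns d i t else (d, i) :: p :: t

def digitDifferenceSort_alt (a : List Int) : List Int :=
  (a.foldl (fun out i => pvIns (pvKey i) i out) []).map Prod.snd

-- ===== PRECONDITION & SPEC =====
-- Pre_ excludes lists containing a negative element: there str(i) starts with a minus
-- sign, so converting the first sorted character with int raises ValueError in A (and
-- in B's key computation alike).
def Pre_digitDifferenceSort (a : List Int) : Prop := ∀ i ∈ a, 0 ≤ i
instance (a : List Int) : Decidable (Pre_digitDifferenceSort a) := by unfold Pre_digitDifferenceSort; infer_instance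
def pvWitness_digitDifferenceSort : List Int := [152, 23, 7, 887, 243]

def Spec_digitDifferenceSort (a : List Int) (out : List Int) : Prop := out = digitDifferenceSort_alt a
instance (a : List Int) (out : List Int) : Decidable (Spec_digitDifferenceSort a out) := by unfold Spec_digitDifferenceSort; infer_instance

-- ===== CLAIM (what is proved, stated in full; the proofs are below) =====
def Claim_equal_digitDifferenceSort : Prop := ∀ (a : List Int), Dom_digitDifferenceSort a → Pre_digitDifferenceSort a → Spec_digitDifferenceSort a (digitDifferenceSort a)

-- ===== LEMMAS AND PROOFS =====

-- the grouped normal form both ports are reduced to: groups listed by the keys ks,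
-- each group holding xs's elements of that key, tagged with their key
def pvGroups (ks xs : List Int) : List (Int × Int) :=
  ks.flatMap (fun d => (xs.filter (fun e => pvKey e == d)).map (fun e => (pvKey e, e)))

lemma pvGroups_cons (d : Int) (ks xs : List Int) :
    pvGroups (d :: ks) xs
      = (xs.filter (fun e => pvKey e == d)).map (fun e => (pvKey e, e)) ++ pvGroups ks xs :=
  List.flatMap_cons ..

-- B side: pvIns skips a prefix of smaller-key entries
lemma pv_pvIns_append (d i : Int) (l1 l2 : List (Int × Int))
    (h : ∀ p ∈ l1, p.1 < d) :
    pvIns d i (l1 ++ l2) = l1 ++ pvIns d i l2 := by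
  induction l1 with
  | nil => rfl
  | cons p t ih =>
      have hp := h p (by simp)
      simp only [List.cons_append, pvIns, hp, if_true]
      exact congrArg (p :: ·) (ih (fun q hq => h q (by simp [hq])))

-- B side: pvIns inserts at the very front when no entry's key is smaller
lemma pv_pvIns_front (d i : Int) (l : List (Int × Int))
    (h : ∀ p ∈ l, ¬ p.1 < d) :
    pvIns d i l = (d, i) :: l := by
  cases l with
  | nil => rfl
  | cons p t =>
      have hp := h p (by simp)
      simp [pvIns, hp]

-- B side: inserting x into the grouped form prepends it to its own group
lemma pv_ins_groups (x : Int) (xs : List Int) :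
    ∀ ks : List Int, ks.Pairwise (· < ·) → pvKey x ∈ ks →
    pvIns (pvKey x) x (pvGroups ks xs) = pvGroups ks (x :: xs) := by
  intro ks hp hm
  induction ks with
  | nil => cases hm
  | cons d ks' ih =>
      have hlt : ∀ d' ∈ ks', d < d' := fun d' hd' => List.rel_of_pairwise_cons hp hd'
      by_cases hkd : pvKey x = d
      · -- x's group is the first: every entry's key is ≥ d, so x lands at the front
        have hfront : ∀ p ∈ pvGroups (d :: ks') xs, ¬ p.1 < pvKey x := by
          intro p hpm
          obtain ⟨d', hd', hpf⟩ := List.mem_flatMap.1 hpm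
          obtain ⟨e, hef, hpe⟩ := List.mem_map.1 hpf
          have hke : pvKey e = d' := by simpa using (List.of_mem_filter hef)
          have hp1 : p.1 = d' := by rw [← hpe, hke]
          rcases List.mem_cons.1 hd' with h | h
          · omega
          · have := hlt d' h; omega
        rw [pv_pvIns_front _ _ _ hfront]
        have hfirst : (x :: xs).filter (fun e => pvKey e == d)
            = x :: xs.filter (fun e => pvKey e == d) := by
          simp [hkd]
        have hothers : pvGroups ks' (x :: xs) = pvGroups ks' xs := by
          unfold pvGroups
          apply List.flatMap_congr
          intro d' hd'
          have : pvKey x ≠ d' := by have := hlt d' hd'; omega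
          simp [this]
        rw [pvGroups_cons, pvGroups_cons, hfirst, hothers]
        simp [hkd]
      · -- x belongs to a later group: skip the whole first group, recurse
        have hm' : pvKey x ∈ ks' := by
          rcases List.mem_cons.1 hm with h | h
          · exact absurd h hkd
          · exact h
        have hdx : d < pvKey x := hlt _ hm'
        have hfirst : (x :: xs).filter (fun e => pvKey e == d)
            = xs.filter (fun e => pvKey e == d) := by
          simp [hkd]
        rw [pvGroups_cons,
            pv_pvIns_append _ _ _ _ (by
              intro p hpm
              obtain ⟨e, hef, hpe⟩ := List.mem_map.1 hpm
              have hke : pvKey e = d := by simpa using (List.of_mem_filter hef)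
              rw [← hpe]; simpa [hke] using hdx),
            ih hp.of_cons hm', pvGroups_cons, hfirst]

-- B side: the whole insertion loop produces the grouped form of the reversed input
lemma pv_foldl_ins_groups (a ks : List Int)
    (hp : ks.Pairwise (· < ·)) (hcov : ∀ e ∈ a, pvKey e ∈ ks) :
    a.foldl (fun out i => pvIns (pvKey i) i out) [] = pvGroups ks a.reverse := by
  induction a using List.reverseRecOn with
  | nil => simp [pvGroups]
  | append_singleton xs x ih =>
      rw [List.foldl_append, List.foldl_cons, List.foldl_nil,
          ih (fun e he => hcov e (by simp [he])), List.reverse_append]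
      exact pv_ins_groups x xs.reverse ks hp (hcov x (by simp))

-- A side: A's dict-building step is Dict.modify
lemma pv_step_eq_modify (x : PySem.Dict Int (List Int)) (i : Int) :
    (let d := pvKey i
     let x := if x.contains d then x else x.insert d []
     x.insert d (x.getD d [] ++ [i])) = x.modify (pvKey i) [] (· ++ [i]) := by
  by_cases h : x.contains (pvKey i)
  · simp [h, PySem.Dict.modify]
  · rw [PySem.Dict.modify, PySem.Dict.getD_of_not_contains _ _ (by simpa using h)]
    simp [h, PySem.Dict.insert_insert_self, PySem.Dict.getD_insert_self]

-- A side: the dict built by A's first loop, observed through getD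
lemma pv_dict_getD (a : List Int) (c : Int) :
    (a.foldl (fun (x : PySem.Dict Int (List Int)) i =>
        let d := pvKey i
        let x := if x.contains d then x else x.insert d []
        x.insert d (x.getD d [] ++ [i])) PySem.Dict.empty).getD c []
      = a.filter (fun e => pvKey e == c) := by
  have hfe : (fun (x : PySem.Dict Int (List Int)) i =>
      let d := pvKey i
      let x := if x.contains d then x else x.insert d []
      x.insert d (x.getD d [] ++ [i]))
      = fun (x : PySem.Dict Int (List Int)) i => x.modify (pvKey i) [] (· ++ [i]) := by
    funext x i; exact pv_step_eq_modify x i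
  rw [hfe]
  have := PySem.Dict.getD_foldl_modify_append (a.map (fun i => (pvKey i, i)))
            (PySem.Dict.empty : PySem.Dict Int (List Int)) c
  rw [List.foldl_map] at this
  simpa [List.filter_map, Function.comp_def] using this

-- A side: and through its key list
lemma pv_dict_keys (a : List Int) :
    (a.foldl (fun (x : PySem.Dict Int (List Int)) i =>
        let d := pvKey i
        let x := if x.contains d then x else x.insert d []
        x.insert d (x.getD d [] ++ [i])) PySem.Dict.empty).keys
      = PySem.Set.ofList (a.map pvKey) := by
  have hfe : (fun (x : PySem.Dict Int (List Int)) i =>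
      let d := pvKey i
      let x := if x.contains d then x else x.insert d []
      x.insert d (x.getD d [] ++ [i]))
      = fun (x : PySem.Dict Int (List Int)) i => x.modify (pvKey i) [] (· ++ [i]) := by
    funext x i; exact pv_step_eq_modify x i
  rw [hfe]
  have := PySem.Dict.keys_foldl_modify_key a pvKey ([] : List Int)
            (fun _ i => (· ++ [i])) (PySem.Dict.empty : PySem.Dict Int (List Int))
  simpa [PySem.Dict.keys_empty, PySem.Set.update, PySem.Set.ofList] using this

-- ===== VERDICT (by name: the statement is the Claim_ definition above) =====
theorem digitDifferenceSort_spec : Claim_equal_digitDifferenceSort := by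
  intro a _ _
  unfold Spec_digitDifferenceSort digitDifferenceSort digitDifferenceSort_alt
  simp only [pv_dict_keys, pv_dict_getD,
    PySem.List.foldl_append_eq_flatMap, List.nil_append,
    PySem.List.slice?_none_none_neg_one, Option.getD_some]
  rw [pv_foldl_ins_groups a
        (PySem.List.sorted (PySem.Set.ofList (a.map pvKey)) (fun j => j) false)
        (by simpa using PySem.List.sorted_ofList_pairwise_lt (a.map pvKey))
        (by intro e he
            rw [PySem.List.mem_sorted]
            exact (PySem.Set.mem_ofList _ _).2 (List.mem_map.2 ⟨e, he, rfl⟩))]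
  unfold pvGroups
  rw [List.map_flatMap]
  apply List.flatMap_congr
  intro d _
  rw [List.map_map, List.filter_reverse]
  simp [Function.comp_def]
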